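-- pv_equiv track=rewrite | github.com/Halildeu/platform-ssot | scripts/doc_repair_apply.py | ensure_downstream_token
-- ===== SOURCE A (Python) =====
-- def ensure_downstream_token(story_text: str, token: str) -> str:
--     """
--     STORY meta bloğundaki Downstream satırına token ekler.
--     Downstream yoksa meta bloğa insert eder.
--     """
--     lines = story_text.splitlines()
--
--     def insert_after(idx: int, new_line: str) -> str:
--         lines.insert(idx + 1, new_line)
--         return "\n".join(lines) + ("\n" if story_text.endswith("\n") else "")
--
--     downstream_idx = None
--     for i, l in enumerate(lines[:25]):
--         if l.startswith("Downstream:"):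
--             downstream_idx = i
--             break
--
--     if downstream_idx is not None:
--         existing = lines[downstream_idx]
--         if token in existing:
--             return story_text
--         lines[downstream_idx] = existing.rstrip() + f", {token}"
--         return "\n".join(lines) + ("\n" if story_text.endswith("\n") else "")
--
--     # Downstream yoksa: Upstream/Owner/Status/ID satırlarından sonra ekleyelim.
--     for key in ("Upstream:", "Owner:", "Status:", "Epic:", "ID:"):
--         for i, l in enumerate(lines[:25]):
--             if l.startswith(key):
--                 return insert_after(i, f"Downstream: {token}")
--
--     # Fallback: H1 sonrası ekle
--     for i, l in enumerate(lines[:10]):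
--         if l.startswith("# "):
--             return insert_after(i, f"Downstream: {token}")
--     return story_text
-- ===== SOURCE B (Python) =====
-- KEYS = ("Downstream:", "Upstream:", "Owner:", "Status:", "Epic:", "ID:")
--
-- def ensure_downstream_token(story_text: str, token: str) -> str:
--     """One pass over the first 25 lines builds an index dict; branches are pure lookups."""
--     lines = story_text.splitlines()
--     first = {}
--     for i, l in enumerate(lines[:25]):
--         for key in KEYS:
--             if key not in first and l.startswith(key):
--                 first[key] = i
--     tail = "\n" if story_text.endswith("\n") else ""
--
--     if "Downstream:" in first:
--         idx = first["Downstream:"]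
--         if token in lines[idx]:
--             return story_text
--         lines[idx] = lines[idx].rstrip() + ", " + token
--         return "\n".join(lines) + tail
--
--     for key in KEYS[1:]:
--         if key in first:
--             idx = first[key]
--             return "\n".join(lines[:idx + 1] + ["Downstream: " + token] + lines[idx + 1:]) + tail
--
--     h1 = next((i for i, l in enumerate(lines[:10]) if l.startswith("# ")), None)
--     if h1 is not None:
--         return "\n".join(lines[:h1 + 1] + ["Downstream: " + token] + lines[h1 + 1:]) + tail
--     return story_text
-- ===== Notes on version B (the rewrite author's own statement) =====
-- stated objective: alternative
-- what changed: A rescans lines[:25] once per metadata key (nested key-by-key passes plus a separate Downstream scan); B makes one pass over lines[:25] building a dict from each key to its first line index and then decides every branch by dict lookups.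
import Mathlib
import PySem

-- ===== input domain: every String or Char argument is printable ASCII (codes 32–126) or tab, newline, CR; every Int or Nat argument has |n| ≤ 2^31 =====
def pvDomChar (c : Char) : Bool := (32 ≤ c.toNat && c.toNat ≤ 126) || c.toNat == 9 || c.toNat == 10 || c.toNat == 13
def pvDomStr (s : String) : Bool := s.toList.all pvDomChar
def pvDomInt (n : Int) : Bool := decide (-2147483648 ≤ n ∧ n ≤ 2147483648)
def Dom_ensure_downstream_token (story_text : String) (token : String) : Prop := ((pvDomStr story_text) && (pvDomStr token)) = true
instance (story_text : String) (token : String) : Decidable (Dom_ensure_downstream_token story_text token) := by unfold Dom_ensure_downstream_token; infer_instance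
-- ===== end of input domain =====

-- B replaces A's per-key rescan (6 passes over lines[:25]) by one pass building a
-- first-occurrence index dict, then branches on lookups; objective: alternative/simpler.

-- ===== PORT A =====
-- scan of 'for i, l in enumerate(...): if l.startswith(key): … break' with running counter
def edtA_find (key : String) : List String → Nat → Option Nat
  | [], _ => none
  | l :: rest, i => if PySem.Str.startswith l key then some i else edtA_find key rest (i + 1)

-- A's insert_after: lines.insert(idx+1, new_line); join; trailing newline restored
def edtA_insert_after (story_text : String) (lines : List String) (idx : Nat) (new_line : String) : String :=
  PySem.Str.join "\n" (PySem.List.insert lines ((idx : Int) + 1) new_line) ++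
    (if PySem.Str.endswith story_text "\n" then "\n" else "")

-- A's 'for key in (…): for i, l in enumerate(lines[:25]): …' followed by the H1 fallback
def edtA_keyloop (story_text : String) (token : String) (lines : List String) (head : List String) :
    List String → String
  | [] =>
    match edtA_find "# " (PySem.List.slice lines none (some 10)) 0 with
    | some i => edtA_insert_after story_text lines i ("Downstream: " ++ token)
    | none => story_text
  | key :: keys =>
    match edtA_find key head 0 with
    | some i => edtA_insert_after story_text lines i ("Downstream: " ++ token)
    | none => edtA_keyloop story_text token lines head keys

def ensure_downstream_token (story_text : String) (token : String) : String :=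
  let lines := PySem.Str.splitlines story_text
  let head := PySem.List.slice lines none (some 25)
  match edtA_find "Downstream:" head 0 with
  | some i =>
    let existing := lines.getD i ""   -- lines[downstream_idx]: index is in range by construction
    if PySem.Str.isIn token existing then story_text
    else
      PySem.Str.join "\n" (lines.set i (PySem.Str.rstrip existing ++ ", " ++ token)) ++
        (if PySem.Str.endswith story_text "\n" then "\n" else "")
  | none => edtA_keyloop story_text token lines head ["Upstream:", "Owner:", "Status:", "Epic:", "ID:"]

-- ===== PORT B =====
def edtB_KEYS : List String := ["Downstream:", "Upstream:", "Owner:", "Status:", "Epic:", "ID:"]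

-- inner 'for key in KEYS: if key not in first and l.startswith(key): first[key] = i'
def edtB_tryKeys (i : Nat) (l : String) (d : PySem.Dict String Nat) : List String → PySem.Dict String Nat
  | [] => d
  | key :: ks =>
      edtB_tryKeys i l
        (if !(d.contains key) && PySem.Str.startswith l key then d.insert key i else d) ks

-- outer 'for i, l in enumerate(lines[:25])'
def edtB_scan (d : PySem.Dict String Nat) : List String → Nat → PySem.Dict String Nat
  | [], _ => d
  | l :: rest, i => edtB_scan (edtB_tryKeys i l d edtB_KEYS) rest (i + 1)

-- 'next((i for i, l in enumerate(lines[:10]) if l.startswith("# ")), None)'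
def edtB_h1 : List String → Nat → Option Nat
  | [], _ => none
  | l :: rest, i => if PySem.Str.startswith l "# " then some i else edtB_h1 rest (i + 1)

-- '"\n".join(lines[:idx+1] + ["Downstream: " + token] + lines[idx+1:]) + tail'
def edtB_ins (lines : List String) (idx : Nat) (token : String) (tail : String) : String :=
  PySem.Str.join "\n" (lines.take (idx + 1) ++ ("Downstream: " ++ token) :: lines.drop (idx + 1)) ++ tail

-- 'for key in KEYS[1:]: if key in first: …' then the H1 fallback
def edtB_keychain (story_text : String) (token : String) (tail : String) (lines : List String)
    (d : PySem.Dict String Nat) : List String → String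
  | [] =>
    match edtB_h1 (PySem.List.slice lines none (some 10)) 0 with
    | some i => edtB_ins lines i token tail
    | none => story_text
  | key :: ks =>
    match d.get? key with
    | some i => edtB_ins lines i token tail
    | none => edtB_keychain story_text token tail lines d ks

def ensure_downstream_token_alt (story_text : String) (token : String) : String :=
  let lines := PySem.Str.splitlines story_text
  let d := edtB_scan PySem.Dict.empty (PySem.List.slice lines none (some 25)) 0
  let tail := if PySem.Str.endswith story_text "\n" then "\n" else ""
  match d.get? "Downstream:" with
  | some idx =>
    let existing := lines.getD idx ""
    if PySem.Str.isIn token existing then story_text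
    else PySem.Str.join "\n" (lines.set idx (PySem.Str.rstrip existing ++ ", " ++ token)) ++ tail
  | none => edtB_keychain story_text token tail lines d ["Upstream:", "Owner:", "Status:", "Epic:", "ID:"]

-- ===== PRECONDITION & SPEC =====
def Spec_ensure_downstream_token (story_text : String) (token : String) (out : String) : Prop := out = ensure_downstream_token_alt story_text token
instance (story_text : String) (token : String) (out : String) : Decidable (Spec_ensure_downstream_token story_text token out) := by unfold Spec_ensure_downstream_token; infer_instance

-- ===== CLAIM (what is proved, stated in full; the proofs are below) =====
def Claim_equal_ensure_downstream_token : Prop := ∀ (story_text : String) (token : String), Dom_ensure_downstream_token story_text token → Spec_ensure_downstream_token story_text token (ensure_downstream_token story_text token)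

-- ===== LEMMAS AND PROOFS =====

theorem edtB_KEYS_nodup : edtB_KEYS.Nodup := by decide

theorem edtB_tryKeys_get_not_mem (ks : List String) (i : Nat) (l : String)
    (d : PySem.Dict String Nat) (key : String) (h : key ∉ ks) :
    (edtB_tryKeys i l d ks).get? key = d.get? key := by
  induction ks generalizing d with
  | nil => rfl
  | cons k ks ih =>
    simp only [List.mem_cons, not_or] at h
    simp only [edtB_tryKeys]
    rw [ih _ h.2]
    split
    · exact PySem.Dict.get?_insert_of_ne _ _ h.1
    · rfl

theorem edtB_tryKeys_get_mem (ks : List String) (i : Nat) (l : String)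
    (d : PySem.Dict String Nat) (key : String) (hmem : key ∈ ks) (hnd : ks.Nodup) :
    (edtB_tryKeys i l d ks).get? key =
      (d.get? key).or (if PySem.Str.startswith l key then some i else none) := by
  induction ks generalizing d with
  | nil => cases hmem
  | cons k ks ih =>
    rcases List.nodup_cons.mp hnd with ⟨hk, hnd'⟩
    simp only [edtB_tryKeys]
    rcases List.mem_cons.mp hmem with rfl | hmem'
    · rw [edtB_tryKeys_get_not_mem _ _ _ _ _ hk]
      rw [PySem.Dict.contains_eq_isSome_get?]
      cases hd : d.get? key with
      | some v => simp [hd]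
      | none =>
        simp only [Option.isSome_none, Bool.not_false, Bool.true_and, Option.or]
        split
        · exact PySem.Dict.get?_insert_self _ _ _
        · exact hd
    · have hne : key ≠ k := fun h => hk (h ▸ hmem')
      rw [ih _ hmem' hnd']
      split
      · rw [PySem.Dict.get?_insert_of_ne _ _ hne]
      · rfl

theorem edtB_scan_get (ls : List String) (i : Nat) (d : PySem.Dict String Nat)
    (key : String) (hmem : key ∈ edtB_KEYS) :
    (edtB_scan d ls i).get? key = (d.get? key).or (edtA_find key ls i) := by
  induction ls generalizing d i with
  | nil =>
    rw [show edtB_scan d [] i = d from rfl]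
    cases d.get? key <;> rfl
  | cons l rest ih =>
    rw [show edtB_scan d (l :: rest) i = edtB_scan (edtB_tryKeys i l d edtB_KEYS) rest (i + 1) from rfl,
        ih _ _, edtB_tryKeys_get_mem _ _ _ _ _ hmem edtB_KEYS_nodup,
        show edtA_find key (l :: rest) i =
          if PySem.Str.startswith l key then some i else edtA_find key rest (i + 1) from rfl]
    cases hd : d.get? key with
    | some v => simp [Option.or]
    | none => cases hsw : PySem.Str.startswith l key <;> simp [Option.or]

theorem edtA_find_bound (key : String) (ls : List String) (i : Nat) (j : Nat)
    (h : edtA_find key ls i = some j) : i ≤ j ∧ j < i + ls.length := by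
  induction ls generalizing i with
  | nil => simp [edtA_find] at h
  | cons l rest ih =>
    simp only [edtA_find] at h
    split at h
    · cases h
      refine ⟨le_refl _, ?_⟩
      simp only [List.length_cons]
      omega
    · rcases ih _ h with ⟨h1, h2⟩
      refine ⟨by omega, ?_⟩
      simp only [List.length_cons]
      omega

theorem edtB_h1_eq (ls : List String) (i : Nat) : edtB_h1 ls i = edtA_find "# " ls i := by
  induction ls generalizing i with
  | nil => rfl
  | cons l rest ih => simp only [edtB_h1, edtA_find, ih]

theorem edt_ins_eq (story_text : String) (lines : List String) (j : Nat) (token : String)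
    (h : j + 1 ≤ lines.length) :
    edtA_insert_after story_text lines j ("Downstream: " ++ token) =
      edtB_ins lines j token (if PySem.Str.endswith story_text "\n" then "\n" else "") := by
  unfold edtA_insert_after edtB_ins
  have hcast : ((j : Int) + 1) = ((j + 1 : Nat) : Int) := by push_cast; ring
  rw [hcast, PySem.List.insert_natCast _ _ _ h]

theorem edt_keyloop_eq (story_text token tail : String) (lines head : List String)
    (d : PySem.Dict String Nat) (hlen : head.length ≤ lines.length)
    (htail : tail = if PySem.Str.endswith story_text "\n" then "\n" else "")
    (ks : List String) (hks : ∀ key ∈ ks, d.get? key = edtA_find key head 0) :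
    edtA_keyloop story_text token lines head ks = edtB_keychain story_text token tail lines d ks := by
  induction ks with
  | nil =>
    simp only [edtA_keyloop, edtB_keychain, edtB_h1_eq]
    cases hf : edtA_find "# " (PySem.List.slice lines none (some 10)) 0 with
    | none => rfl
    | some i =>
      have hsl : PySem.List.slice lines none (some 10) = lines.take ((10 : Int).toNat) :=
        PySem.List.slice_to _ (by norm_num)
      have hb := edtA_find_bound _ _ _ _ hf
      rw [hsl] at hb
      simp only [List.length_take] at hb
      rw [htail]
      exact edt_ins_eq story_text lines i token (by omega)
  | cons key ks ih =>
    simp only [edtA_keyloop, edtB_keychain]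
    rw [hks key (List.mem_cons_self)]
    cases hf : edtA_find key head 0 with
    | none => exact ih (fun k hk => hks k (List.mem_cons_of_mem _ hk))
    | some i =>
      have hb := edtA_find_bound _ _ _ _ hf
      rw [htail]
      exact edt_ins_eq story_text lines i token (by omega)

-- ===== VERDICT (by name: the statement is the Claim_ definition above) =====
theorem ensure_downstream_token_spec : Claim_equal_ensure_downstream_token := by
  intro story_text token _
  unfold Spec_ensure_downstream_token
  simp only [ensure_downstream_token, ensure_downstream_token_alt]
  generalize PySem.Str.splitlines story_text = lines
  have hlen : (PySem.List.slice lines none (some 25)).length ≤ lines.length := by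
    rw [PySem.List.slice_to _ (by norm_num : (0:Int) ≤ 25)]
    simp [List.length_take]
  have hget : ∀ key, key ∈ edtB_KEYS →
      (edtB_scan PySem.Dict.empty (PySem.List.slice lines none (some 25)) 0).get? key =
        edtA_find key (PySem.List.slice lines none (some 25)) 0 := by
    intro key hk
    rw [edtB_scan_get _ _ _ _ hk, PySem.Dict.get?_empty]
    rfl
  rw [hget "Downstream:" (by decide)]
  cases hf : edtA_find "Downstream:" (PySem.List.slice lines none (some 25)) 0 with
  | some i => rfl
  | none =>
    exact edt_keyloop_eq story_text token _ lines _ _ hlen rfl _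
      (fun key hk => hget key (by
        simp only [edtB_KEYS, List.mem_cons] at hk ⊢; tauto))
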